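-- pv_equiv track=rewrite | github.com/Stanislus29/stangorithms | StanLogic/tests/KMapSolver/test_optimizations.py | evaluate_expression_sop
-- ===== SOURCE A (Python) =====
-- def evaluate_expression_sop(expr_str, num_vars, assignment):
--     """
--     Evaluate a SOP expression for a given variable assignment.
--
--     Args:
--         expr_str: SOP expression string
--         num_vars: Number of variables
--         assignment: List of 0/1 values for variables
--
--     Returns:
--         Boolean result
--     """
--     if not expr_str or expr_str == "0":
--         return False
--     if expr_str == "1":
--         return True
--
--     # Split into terms
--     terms = expr_str.split(' + ')
--
--     for term in terms:
--         term = term.strip()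
--         if not term:
--             continue
--
--         # Evaluate AND of literals
--         term_result = True
--         i = 0
--         while i < len(term):
--             if term[i] == 'x':
--                 i += 1
--                 var_num = ''
--                 while i < len(term) and term[i].isdigit():
--                     var_num += term[i]
--                     i += 1
--
--                 var_idx = int(var_num) - 1
--
--                 # Check for complement
--                 if i < len(term) and term[i] == "'":
--                     term_result = term_result and (not assignment[var_idx])
--                     i += 1
--                 else:
--                     term_result = term_result and assignment[var_idx]
--             else:
--                 i += 1
--
--         # OR the terms
--         if term_result:
--             return True
--
--     return False
-- ===== SOURCE B (Python) =====
-- def evaluate_expression_sop(expr_str, num_vars, assignment):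
--     if not expr_str or expr_str == "0":
--         return False
--     if expr_str == "1":
--         return True
--     for term in expr_str.split(' + '):
--         term = term.strip()
--         if not term:
--             continue
--         # single reverse pass: a digit buffer grows right-to-left; an 'x' closes a literal
--         ok = True
--         digits = ''
--         neg = False
--         for c in reversed(term):
--             if c == 'x':
--                 idx = int(digits) - 1
--                 ok = ok and ((not assignment[idx]) if neg else bool(assignment[idx]))
--                 digits, neg = '', False
--             elif c.isdigit():
--                 digits = c + digits
--             elif c == "'":
--                 digits, neg = '', True
--             else:
--                 digits, neg = '', False
--         if ok:
--             return True
--     return False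
-- ===== Notes on version B (the rewrite author's own statement) =====
-- stated objective: alternative
-- what changed: Each term is evaluated in one right-to-left pass over its characters (a digit buffer and a complement flag, closed whenever an 'x' is met) instead of A's forward index while-loop with a nested digit-collecting inner loop.
-- outside the precondition, e.g. on evaluate_expression_sop("x1'x9", 2, [1, 1]): A returns False, B raises IndexError; on evaluate_expression_sop('x1 + x9', 1, [1]): A returns True, B returns True
import Mathlib
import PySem

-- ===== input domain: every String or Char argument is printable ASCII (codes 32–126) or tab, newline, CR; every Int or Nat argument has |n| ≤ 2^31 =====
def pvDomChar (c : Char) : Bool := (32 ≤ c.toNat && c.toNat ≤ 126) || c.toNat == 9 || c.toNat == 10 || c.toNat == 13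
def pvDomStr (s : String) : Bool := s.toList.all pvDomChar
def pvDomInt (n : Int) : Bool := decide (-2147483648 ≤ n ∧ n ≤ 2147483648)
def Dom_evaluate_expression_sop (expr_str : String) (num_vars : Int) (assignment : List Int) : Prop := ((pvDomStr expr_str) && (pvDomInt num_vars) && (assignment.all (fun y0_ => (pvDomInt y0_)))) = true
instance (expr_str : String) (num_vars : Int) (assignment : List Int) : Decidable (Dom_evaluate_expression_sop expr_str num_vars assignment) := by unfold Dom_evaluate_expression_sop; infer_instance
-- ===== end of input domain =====

-- B evaluates each term in ONE reverse pass (digit buffer + complement flag, closed at each 'x')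
-- instead of A's forward index while-loop with a nested digit-collecting loop; objective: alternative.

-- ===== PORT A =====
-- inner while: collect consecutive digits into var_num (acc), return it with the remaining chars
def pvA_digits (cs : List Char) (acc : List Char) : List Char × List Char :=
  match cs with
  | [] => (acc, [])
  | c :: cs' => if PySem.Chars.isdigit c then pvA_digits cs' (acc ++ [c]) else (acc, c :: cs')

-- used by pvA_scan's termination proof
theorem pvA_digits_eq (cs acc : List Char) :
    pvA_digits cs acc = (acc ++ cs.takeWhile PySem.Chars.isdigit, cs.dropWhile PySem.Chars.isdigit) := by
  induction cs generalizing acc with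
  | nil => simp [pvA_digits]
  | cons c cs ih =>
    by_cases h : PySem.Chars.isdigit c = true <;> simp [pvA_digits, h, ih]

-- the outer while over the term's characters; r is term_result (its truthiness);
-- "term_result and assignment[var_idx]" tracked as r && (value ≠ 0), lookup via total pyGetD
-- (exact under Pre_, where every evaluated index is in range)
def pvA_scan (a : List Int) (cs : List Char) (r : Bool) : Bool :=
  match cs with
  | [] => r
  | c :: cs' =>
    if c = 'x' then
      let p := pvA_digits cs' []
      let idx : Int := (PySem.Int.ofChars? p.1).getD 0 - 1
      if hr : p.2 = [] then r && decide (PySem.List.pyGetD a idx 0 ≠ 0)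
      else if p.2.head hr = '\'' then pvA_scan a p.2.tail (r && decide (PySem.List.pyGetD a idx 0 = 0))
      else pvA_scan a p.2 (r && decide (PySem.List.pyGetD a idx 0 ≠ 0))
    else pvA_scan a cs' r
termination_by cs.length
decreasing_by
  all_goals
    (try simp
     try (have h2 : (pvA_digits cs' []).2.length ≤ cs'.length := by
            rw [pvA_digits_eq]; exact List.length_dropWhile_le _ _
          omega))

-- for term in terms: strip, skip empties, early return on a satisfied term
def pvA_terms (a : List Int) (ts : List (List Char)) : Bool :=
  match ts with
  | [] => false
  | t :: ts' =>
    let t' := PySem.Chars.strip t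
    if t' = [] then pvA_terms a ts'
    else if pvA_scan a t' true then true else pvA_terms a ts'

def evaluate_expression_sop (expr_str : String) (num_vars : Int) (assignment : List Int) : Bool :=
  if expr_str = "" ∨ expr_str = "0" then false
  else if expr_str = "1" then true
  else pvA_terms assignment (PySem.Chars.splitOn expr_str.toList " + ".toList)

-- ===== PORT B =====
-- one step of B's reverse pass; state ((digit buffer, complement flag), running AND)
def pvB_step (a : List Int) (st : (List Char × Bool) × Bool) (c : Char) : (List Char × Bool) × Bool :=
  if c = 'x' then
    let idx : Int := (PySem.Int.ofChars? st.1.1).getD 0 - 1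
    (([], false), st.2 && (if st.1.2 then decide (PySem.List.pyGetD a idx 0 = 0)
                           else decide (PySem.List.pyGetD a idx 0 ≠ 0)))
  else if PySem.Chars.isdigit c then ((c :: st.1.1, st.1.2), st.2)
  else if c = '\'' then (([], true), st.2)
  else (([], false), st.2)

def pvB_terms (a : List Int) (ts : List (List Char)) : Bool :=
  match ts with
  | [] => false
  | t :: ts' =>
    let t' := PySem.Chars.strip t
    if t' = [] then pvB_terms a ts'
    else if (t'.reverse.foldl (pvB_step a) (([], false), true)).2 then true
    else pvB_terms a ts'

def evaluate_expression_sop_alt (expr_str : String) (num_vars : Int) (assignment : List Int) : Bool :=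
  if expr_str = "" ∨ expr_str = "0" then false
  else if expr_str = "1" then true
  else pvB_terms assignment (PySem.Chars.splitOn expr_str.toList " + ".toList)

-- ===== PRECONDITION & SPEC =====
-- Pre_ excludes the inputs where the Python A raises: an 'x' not followed by a digit (ValueError
-- from int('')) or a literal's variable number out of range (IndexError); being a per-character
-- condition it also excludes a few inputs on which such a broken literal is skipped by
-- `and`-short-circuit or by the early return on a satisfied term and A still returns (see cites).
def Pre_evaluate_expression_sop (expr_str : String) (num_vars : Int) (assignment : List Int) : Prop :=
  (expr_str.toList.zipIdx.all fun p =>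
    !(p.1 = 'x' : Bool) ||
      (let ds := (expr_str.toList.drop (p.2 + 1)).takeWhile PySem.Chars.isdigit
       !ds.isEmpty &&
         (let n := (PySem.Int.ofChars? ds).getD 0
          (!(n = 0 : Bool) || !assignment.isEmpty) && decide (n ≤ assignment.length)))) = true
instance (expr_str : String) (num_vars : Int) (assignment : List Int) : Decidable (Pre_evaluate_expression_sop expr_str num_vars assignment) := by unfold Pre_evaluate_expression_sop; infer_instance

def pvWitness_evaluate_expression_sop : String × Int × List Int := ("x1'x2 + x3", 3, [0, 1, 1])

def Spec_evaluate_expression_sop (expr_str : String) (num_vars : Int) (assignment : List Int) (out : Bool) : Prop := out = evaluate_expression_sop_alt expr_str num_vars assignment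
instance (expr_str : String) (num_vars : Int) (assignment : List Int) (out : Bool) : Decidable (Spec_evaluate_expression_sop expr_str num_vars assignment out) := by unfold Spec_evaluate_expression_sop; infer_instance

-- ===== CLAIM (what is proved, stated in full; the proofs are below) =====
def Claim_equal_evaluate_expression_sop : Prop := ∀ (expr_str : String) (num_vars : Int) (assignment : List Int), Dom_evaluate_expression_sop expr_str num_vars assignment → Pre_evaluate_expression_sop expr_str num_vars assignment → Spec_evaluate_expression_sop expr_str num_vars assignment (evaluate_expression_sop expr_str num_vars assignment)

-- ===== LEMMAS AND PROOFS =====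
-- the complement flag B's reverse pass carries for a suffix cs: the first
-- non-digit character of cs is an apostrophe
def pvNegflag (cs : List Char) : Bool := (cs.dropWhile PySem.Chars.isdigit).head? == some '\''

-- the sequence of literals (digit run, complemented?) of a term, left to right
def pvLits : List Char → List (List Char × Bool)
  | [] => []
  | c :: cs => if c = 'x' then (cs.takeWhile PySem.Chars.isdigit, pvNegflag cs) :: pvLits cs else pvLits cs

def pvEvalLit (a : List Int) (l : List Char × Bool) : Bool :=
  if l.2 then decide (PySem.List.pyGetD a ((PySem.Int.ofChars? l.1).getD 0 - 1) 0 = 0)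
  else decide (PySem.List.pyGetD a ((PySem.Int.ofChars? l.1).getD 0 - 1) 0 ≠ 0)

theorem pvLits_nox (pre rest : List Char) (h : ∀ c ∈ pre, c ≠ 'x') :
    pvLits (pre ++ rest) = pvLits rest := by
  induction pre with
  | nil => rfl
  | cons c cs ih =>
    have hc : c ≠ 'x' := h c (by simp)
    simp [pvLits, hc, ih (fun d hd => h d (by simp [hd]))]

theorem no_x_takeWhile (cs : List Char) : ∀ c ∈ cs.takeWhile PySem.Chars.isdigit, c ≠ 'x' := by
  intro c hc
  have := List.mem_takeWhile_imp hc
  intro h; subst h; simp [PySem.Chars.isdigit] at this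

-- A's forward scan computes the AND of the term's literal values
theorem pvA_scan_eq (a : List Int) (cs : List Char) (r : Bool) :
    pvA_scan a cs r = (r && (pvLits cs).all (pvEvalLit a)) := by
  induction cs, r using pvA_scan.induct a with
  | case1 r => simp [pvA_scan, pvLits]
  | case2 r cs' p hr =>
    simp only [p] at hr
    have hd : List.dropWhile PySem.Chars.isdigit cs' = [] := by
      rw [pvA_digits_eq] at hr; simpa using hr
    have ht : List.takeWhile PySem.Chars.isdigit cs' = cs' := by
      conv_rhs => rw [← List.takeWhile_append_dropWhile (p := PySem.Chars.isdigit) (l := cs')]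
      rw [hd]; simp
    have hlits : pvLits cs' = [] := by
      rw [← ht]
      simpa using pvLits_nox (cs'.takeWhile PySem.Chars.isdigit) [] (no_x_takeWhile cs')
    have hneg : pvNegflag cs' = false := by simp [pvNegflag, hd]
    rw [pvA_scan]
    simp [pvA_digits_eq, hd, hlits, hneg, pvLits, pvEvalLit]
  | case3 r cs' p idx hnil hq ih =>
    simp only [p, idx, pvA_digits_eq, List.nil_append] at hnil hq ih
    obtain ⟨q0, rest, hd⟩ : ∃ q0 rest, List.dropWhile PySem.Chars.isdigit cs' = q0 :: rest := by
      cases h : List.dropWhile PySem.Chars.isdigit cs' with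
      | nil => rw [h] at hnil; simp at hnil
      | cons u us => exact ⟨u, us, rfl⟩
    simp only [hd, List.head_cons, List.tail_cons] at hq ih
    subst hq
    have hsplit : cs' = cs'.takeWhile PySem.Chars.isdigit ++ ('\'' :: rest) := by
      conv_lhs => rw [← List.takeWhile_append_dropWhile (p := PySem.Chars.isdigit) (l := cs')]
      rw [hd]
    have hlits : pvLits cs' = pvLits rest := by
      conv_lhs => rw [hsplit]
      rw [pvLits_nox _ _ (no_x_takeWhile cs')]
      simp [pvLits]
    have hneg : pvNegflag cs' = true := by simp [pvNegflag, hd]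
    rw [pvA_scan]
    simp only [pvA_digits_eq, List.nil_append, hd, List.head_cons, List.tail_cons, if_true]
    rw [ih]
    simp [pvLits, hlits, pvEvalLit, hneg, Bool.and_assoc]
  | case4 r cs' p idx hnil hq ih =>
    simp only [p, idx, pvA_digits_eq, List.nil_append] at hnil hq ih
    obtain ⟨q0, rest, hd⟩ : ∃ q0 rest, List.dropWhile PySem.Chars.isdigit cs' = q0 :: rest := by
      cases h : List.dropWhile PySem.Chars.isdigit cs' with
      | nil => rw [h] at hnil; simp at hnil
      | cons u us => exact ⟨u, us, rfl⟩
    simp only [hd, List.head_cons, List.tail_cons] at hq ih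
    have hq0 : q0 ≠ '\'' := hq
    have hsplit : cs' = cs'.takeWhile PySem.Chars.isdigit ++ (q0 :: rest) := by
      conv_lhs => rw [← List.takeWhile_append_dropWhile (p := PySem.Chars.isdigit) (l := cs')]
      rw [hd]
    have hlits : pvLits cs' = pvLits (q0 :: rest) := by
      conv_lhs => rw [hsplit]
      exact pvLits_nox _ _ (no_x_takeWhile cs')
    have hneg : pvNegflag cs' = false := by simp [pvNegflag, hd, hq0]
    rw [pvA_scan]
    simp only [pvA_digits_eq, List.nil_append, hd, List.head_cons, if_true]
    rw [if_neg hq0, ih]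
    simp [pvLits, hlits, pvEvalLit, hneg, Bool.and_assoc]
  | case5 r c cs' hx ih =>
    rw [pvA_scan, if_neg hx, ih]
    simp [pvLits, hx]

-- B's reverse pass: state after the whole suffix cs has been folded in
theorem pvB_state (a : List Int) (cs : List Char) :
    cs.foldr (fun c st => pvB_step a st c) (([], false), true) =
      ((cs.takeWhile PySem.Chars.isdigit, pvNegflag cs), (pvLits cs).all (pvEvalLit a)) := by
  induction cs with
  | nil => simp [pvNegflag, pvLits]
  | cons c cs ih =>
    rw [List.foldr_cons, ih]
    by_cases hx : c = 'x'
    · subst hx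
      simp [pvB_step, pvNegflag, pvLits, PySem.Chars.isdigit, pvEvalLit, Bool.and_comm]
    · by_cases hd : PySem.Chars.isdigit c = true
      · have hng : pvNegflag (c :: cs) = pvNegflag cs := by
          unfold pvNegflag; rw [List.dropWhile_cons_of_pos hd]
        simp [pvB_step, hx, hd, pvLits, hng]
      · by_cases hq : c = '\''
        · subst hq
          simp [pvB_step, hd, pvNegflag, pvLits]
        · have hng : pvNegflag (c :: cs) = false := by
            simp [pvNegflag, hd, hq]
          have htw : List.takeWhile PySem.Chars.isdigit (c :: cs) = [] := by
            simp [hd]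
          simp [pvB_step, hx, hd, hq, pvLits, htw, hng]

theorem pvTerms_eq (a : List Int) (ts : List (List Char)) : pvA_terms a ts = pvB_terms a ts := by
  induction ts with
  | nil => rfl
  | cons t ts ih =>
    rw [pvA_terms, pvB_terms]
    by_cases h : PySem.Chars.strip t = []
    · simp [h, ih]
    · rw [if_neg h, if_neg h, List.foldl_reverse, pvB_state, pvA_scan_eq]
      simp [ih]

-- ===== VERDICT (by name: the statement is the Claim_ definition above) =====
theorem evaluate_expression_sop_spec : Claim_equal_evaluate_expression_sop := by
  intro expr_str num_vars assignment _ _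
  unfold Spec_evaluate_expression_sop evaluate_expression_sop evaluate_expression_sop_alt
  split_ifs <;> simp [pvTerms_eq]
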